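-- pv_equiv track=rewrite | github.com/YabZhang/algo | product_of_array_exclude_itself.py | gen_help_table
-- ===== SOURCE A (Python) =====
-- def gen_help_table(s):
--     left = [1] * len(s)
--     right = [1] * len(s)
--     for i in range(len(s)):
--         if i != 0:
--             left[i] = left[i - 1] * s[i - 1]
--             right[len(s) - i - 1] = right[len(s) - i] * s[len(s) - i]
--     return left, right
-- ===== SOURCE B (Python) =====
-- def _build(s):
--     # product segment tree: (segment product, left child, right child); leaf children are None
--     n = len(s)
--     if n == 1:
--         return (s[0], None, None)
--     a = _build(s[:n // 2])
--     b = _build(s[n // 2:])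
--     return (a[0] * b[0], a, b)
--
-- def _fill(t, lm, rm):
--     # distribute the outside-left product lm and outside-right product rm down the tree
--     p, a, b = t
--     if a is None:
--         return [lm], [rm]
--     la, ra = _fill(a, lm, rm * b[0])
--     lb, rb = _fill(b, lm * a[0], rm)
--     return la + lb, ra + rb
--
-- def gen_help_table(s):
--     if not s:
--         return [], []
--     return _fill(_build(s), 1, 1)
-- ===== Notes on version B (the rewrite author's own statement) =====
-- stated objective: alternative
-- what changed: Replaces A's single indexed fill loop with read-back recurrences (left[i-1], right[len(s)-i], i!=0 guard) by a two-phase divide-and-conquer product tree: first build a segment tree of subrange products, then recursively distribute the outside-left and outside-right products down to the leaves, concatenating the per-segment tables.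
import Mathlib
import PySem

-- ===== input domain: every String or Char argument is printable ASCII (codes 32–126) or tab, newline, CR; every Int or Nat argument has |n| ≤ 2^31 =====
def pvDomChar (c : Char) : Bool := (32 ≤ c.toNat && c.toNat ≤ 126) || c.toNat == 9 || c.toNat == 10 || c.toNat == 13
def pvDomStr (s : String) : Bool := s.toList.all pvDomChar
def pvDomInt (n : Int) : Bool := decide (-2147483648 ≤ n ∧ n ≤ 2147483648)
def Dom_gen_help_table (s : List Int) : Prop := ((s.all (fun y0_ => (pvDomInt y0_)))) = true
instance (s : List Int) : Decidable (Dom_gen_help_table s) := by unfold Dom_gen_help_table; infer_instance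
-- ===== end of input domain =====

-- B replaces A's single indexed fill loop (left[i-1], right[len(s)-i], i!=0 guard) by a
-- divide-and-conquer product tree: build segment products, then distribute outside products down.


-- ===== PORT A =====
-- loop body of A; all reads (left[i-1], s[i-1], right[n-i], s[n-i]) are in range whenever
-- 0 < i < n = len(s), which pyRange guarantees, so the total pyGetD/pySetD forms are exact here
def stepA (s : List Int) (st : List Int × List Int) (i : Int) : List Int × List Int :=
  if i ≠ 0 then
    (PySem.List.pySetD st.1 i
       (PySem.List.pyGetD st.1 (i - 1) 0 * PySem.List.pyGetD s (i - 1) 0),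
     PySem.List.pySetD st.2 ((s.length : Int) - i - 1)
       (PySem.List.pyGetD st.2 ((s.length : Int) - i) 0 * PySem.List.pyGetD s ((s.length : Int) - i) 0))
  else st

def gen_help_table (s : List Int) : List Int × List Int :=
  (PySem.List.pyRange 0 (s.length : Int) 1).foldl (stepA s)
    (List.replicate s.length 1, List.replicate s.length 1)

-- ===== PORT B =====
-- product-tree divide and conquer. Python's node tuple (p, a, b) with None children is the
-- inductive PTree (leaf = both children None); slices s[:n//2], s[n//2:] (nonnegative
-- in-range bounds) are exactly List.take / List.drop; s[0], a[0], b[0] read nonempty data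
inductive PTree where
  | leaf : Int → PTree
  | node : Int → PTree → PTree → PTree
deriving DecidableEq, Repr

def tval : PTree → Int
  | .leaf p => p
  | .node p _ _ => p

-- _build is only applied to nonempty lists (n ≥ 1); the `≤ 1` guard (Python: `n == 1`)
-- only totalises the unreachable empty case
def buildT (s : List Int) : PTree :=
  if s.length ≤ 1 then .leaf (PySem.List.pyGetD s 0 0)
  else
    let a := buildT (s.take (s.length / 2))
    let b := buildT (s.drop (s.length / 2))
    .node (tval a * tval b) a b
termination_by s.length
decreasing_by
  · simp only [List.length_take]; omega
  · simp only [List.length_drop]; omega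

def fillT : PTree → Int → Int → List Int × List Int
  | .leaf _, lm, rm => ([lm], [rm])
  | .node _ a b, lm, rm =>
    let la_ra := fillT a lm (rm * tval b)
    let lb_rb := fillT b (lm * tval a) rm
    (la_ra.1 ++ lb_rb.1, la_ra.2 ++ lb_rb.2)

def gen_help_table_alt (s : List Int) : List Int × List Int :=
  if s = [] then ([], [])
  else fillT (buildT s) 1 1

-- ===== PRECONDITION & SPEC =====
def Spec_gen_help_table (s : List Int) (out : List Int × List Int) : Prop := out = gen_help_table_alt s
instance (s : List Int) (out : List Int × List Int) : Decidable (Spec_gen_help_table s out) := by unfold Spec_gen_help_table; infer_instance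

-- ===== CLAIM (what is proved, stated in full; the proofs are below) =====
def Claim_equal_gen_help_table : Prop := ∀ (s : List Int), Dom_gen_help_table s → Spec_gen_help_table s (gen_help_table s)

-- ===== LEMMAS AND PROOFS =====

/-- running-product list: `pref p [x₀,…]` = `[p, p*x₀, …]` (the prefix-product table). -/
def pref (p : Int) : List Int → List Int
  | [] => []
  | x :: xs => p :: pref (p * x) xs

/-- suffix-product table: `suf s` at index i is the product of the elements after i. -/
def suf : List Int → List Int
  | [] => []
  | _ :: xs => xs.prod :: suf xs

theorem length_pref (p : Int) (s : List Int) : (pref p s).length = s.length := by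
  induction s generalizing p with
  | nil => rfl
  | cons x xs ih => simp [pref, ih]

theorem pref_append (p : Int) (a b : List Int) :
    pref p (a ++ b) = pref p a ++ pref (p * a.prod) b := by
  induction a generalizing p with
  | nil => simp [pref]
  | cons x xs ih => simp [pref, ih, mul_assoc]

theorem suf_append (a b : List Int) :
    suf (a ++ b) = (suf a).map (fun v => v * b.prod) ++ suf b := by
  induction a with
  | nil => simp [suf]
  | cons x xs ih => simp [suf, ih]

theorem length_suf (s : List Int) : (suf s).length = s.length := by
  induction s with
  | nil => rfl
  | cons x xs ih => simp [suf, ih]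

theorem getElem_pref (p : Int) (s : List Int) (i : Nat) (h : i < s.length)
    (h' : i < (pref p s).length) : (pref p s)[i] = p * (s.take i).prod := by
  induction s generalizing p i with
  | nil => simp at h
  | cons x xs ih =>
    cases i with
    | zero => simp [pref]
    | succ j =>
      have hx : j < xs.length := by simpa using h
      simp only [pref, List.getElem_cons_succ, List.take_succ_cons, List.prod_cons]
      rw [ih (p * x) j hx (by rw [length_pref]; exact hx)]
      ring

theorem getElem_pref_one (s : List Int) (i : Nat) (h : i < s.length)
    (h' : i < (pref 1 s).length) : (pref 1 s)[i] = (s.take i).prod := by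
  rw [getElem_pref 1 s i h h', one_mul]

theorem getElem_suf (s : List Int) (i : Nat) (h : i < s.length)
    (h' : i < (suf s).length) : (suf s)[i] = (s.drop (i + 1)).prod := by
  induction s generalizing i with
  | nil => simp at h
  | cons x xs ih =>
    cases i with
    | zero => simp [suf]
    | succ j =>
      have hx : j < xs.length := by simpa using h
      simp only [suf, List.getElem_cons_succ, List.drop_succ_cons]
      exact ih j hx (by rw [length_suf]; exact hx)

theorem tval_node (p : Int) (a b : PTree) : tval (.node p a b) = p := rfl

/-- the tree really carries segment products. -/
theorem buildT_prod (s : List Int) (hne : s ≠ []) : tval (buildT s) = s.prod := by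
  induction hn : s.length using Nat.strong_induction_on generalizing s with
  | _ n ih =>
    rw [buildT]
    by_cases h1 : s.length ≤ 1
    · rw [if_pos h1]
      match s, hne, h1 with
      | [x], _, _ => simp [tval, PySem.List.pyGetD_zero_cons]
    · rw [if_neg h1]
      have hk1 : 1 ≤ s.length / 2 := by omega
      have hkn : s.length / 2 < s.length := by omega
      have hane : s.take (s.length / 2) ≠ [] := by
        intro h; have := congrArg List.length h
        simp only [List.length_take, List.length_nil] at this; omega
      have hbne : s.drop (s.length / 2) ≠ [] := by
        intro h; have := congrArg List.length h
        simp only [List.length_drop, List.length_nil] at this; omega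
      have ha := ih (s.take (s.length / 2)).length
        (by simp only [List.length_take]; omega) (s.take (s.length / 2)) hane rfl
      have hb := ih (s.drop (s.length / 2)).length
        (by simp only [List.length_drop]; omega) (s.drop (s.length / 2)) hbne rfl
      simp only [tval_node, ha, hb]
      rw [← List.prod_append, List.take_append_drop]

/-- distributing multipliers down the tree yields the scaled prefix/suffix tables. -/
theorem fillT_buildT (s : List Int) (hne : s ≠ []) (lm rm : Int) :
    fillT (buildT s) lm rm = (pref lm s, (suf s).map (fun v => v * rm)) := by
  induction hn : s.length using Nat.strong_induction_on generalizing s lm rm with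
  | _ n ih =>
    rw [buildT]
    by_cases h1 : s.length ≤ 1
    · rw [if_pos h1]
      match s, hne, h1 with
      | [x], _, _ => simp [fillT, pref, suf]
    · rw [if_neg h1]
      have hk1 : 1 ≤ s.length / 2 := by omega
      have hkn : s.length / 2 < s.length := by omega
      have hane : s.take (s.length / 2) ≠ [] := by
        intro h; have := congrArg List.length h
        simp only [List.length_take, List.length_nil] at this; omega
      have hbne : s.drop (s.length / 2) ≠ [] := by
        intro h; have := congrArg List.length h
        simp only [List.length_drop, List.length_nil] at this; omega
      have ha := fun lm rm => ih (s.take (s.length / 2)).length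
        (by simp only [List.length_take]; omega) (s.take (s.length / 2)) hane lm rm rfl
      have hb := fun lm rm => ih (s.drop (s.length / 2)).length
        (by simp only [List.length_drop]; omega) (s.drop (s.length / 2)) hbne lm rm rfl
      simp only [fillT, ha, hb, buildT_prod _ hane, buildT_prod _ hbne, Prod.mk.injEq]
      constructor
      · conv_rhs => rw [← List.take_append_drop (s.length / 2) s]
        rw [pref_append]
      · conv_rhs => rw [← List.take_append_drop (s.length / 2) s]
        rw [suf_append, List.map_append, List.map_map]
        congr 1
        apply List.map_congr_left
        intro v _
        simp only [Function.comp]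
        ring

/-- B computes exactly the prefix- and suffix-product tables. -/
theorem alt_eq (s : List Int) : gen_help_table_alt s = (pref 1 s, suf s) := by
  unfold gen_help_table_alt
  by_cases h : s = []
  · subst h; rfl
  · rw [if_neg h, fillT_buildT s h 1 1]
    simp

/-- the suffix table, via the reversed prefix table (the shape A's invariant uses). -/
theorem getElem_rev_pref (s : List Int) (i : Nat) (h : i < s.length)
    (h' : i < (pref 1 s.reverse).reverse.length) :
    (pref 1 s.reverse).reverse[i] = (s.drop (i + 1)).prod := by
  have hlen : (pref 1 s.reverse).length = s.length := by
    rw [length_pref, List.length_reverse]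
  rw [List.getElem_reverse]
  simp only [hlen]
  rw [getElem_pref_one s.reverse (s.length - 1 - i) (by simp; omega)
      (by rw [length_pref]; simp; omega)]
  rw [List.take_reverse, List.prod_reverse]
  have hidx : s.length - (s.length - 1 - i) = i + 1 := by omega
  rw [hidx]

theorem suf_eq_rev_pref (s : List Int) : suf s = (pref 1 s.reverse).reverse := by
  apply List.ext_getElem
  · rw [length_suf, List.length_reverse, length_pref, List.length_reverse]
  · intro i h1 h2
    rw [getElem_suf s i (by rwa [length_suf] at h1) h1,
        getElem_rev_pref s i (by simpa [length_pref] using h2) h2]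

/-- loop invariant for A: after iterations 0..m-1 (1 ≤ m ≤ n), the first m slots of `left`
and the last m slots of `right` carry their final values, the rest is still 1. -/
theorem invA (s : List Int) (m : Nat) (h1 : 1 ≤ m) (h2 : m ≤ s.length) :
    (List.range m).foldl (fun st (k : Nat) => stepA s st (k : Int))
      (List.replicate s.length 1, List.replicate s.length 1)
    = ((pref 1 s).take m ++ List.replicate (s.length - m) 1,
       List.replicate (s.length - m) 1 ++ ((pref 1 s.reverse).reverse).drop (s.length - m)) := by
  induction m with
  | zero => omega
  | succ m ih =>
    set n := s.length with hn
    set L := pref 1 s with hL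
    set R := (pref 1 s.reverse).reverse with hR
    have hLlen : L.length = n := by simp [hL, length_pref, hn]
    have hRlen : R.length = n := by simp [hR, length_pref, hn]
    rcases Nat.eq_or_lt_of_le h1 with hbase | hstep
    · -- base case m+1 = 1: the i = 0 iteration does nothing
      have hm0 : m = 0 := by omega
      subst hm0
      have hn1 : 1 ≤ n := h2
      simp only [List.range_succ, List.range_zero, List.nil_append, List.foldl_cons, List.foldl_nil,
        Nat.cast_zero]
      have : stepA s (List.replicate n 1, List.replicate n 1) 0
          = (List.replicate n 1, List.replicate n 1) := by unfold stepA; norm_num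
      rw [this]
      simp only [Prod.mk.injEq]
      refine ⟨?_, ?_⟩
      · have htake : L.take (0 + 1) = [(1 : Int)] := by
          apply List.ext_getElem
          · simp [hLlen]; omega
          · intro j hj hj'
            simp only [List.length_take] at hj
            have hj0 : j = 0 := by omega
            subst hj0
            rw [List.getElem_take]
            rw [show L[0]'(by rw [hLlen]; omega) = (s.take 0).prod from
              getElem_pref_one s 0 (by omega) (by rw [length_pref]; omega)]
            simp
        rw [htake]
        rw [show [(1 : Int)] ++ List.replicate (n - (0 + 1)) 1
              = List.replicate (n - (0 + 1) + 1) 1 from by rw [List.replicate_succ]; rfl]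
        congr 1
        omega
      · have hdrop : R.drop (n - (0 + 1)) = [(1 : Int)] := by
          rw [List.drop_eq_getElem_cons (show n - (0 + 1) < R.length by omega)]
          rw [show R[n - (0 + 1)]'(by omega) = (s.drop (n - (0 + 1) + 1)).prod from
            getElem_rev_pref s (n - (0 + 1)) (by omega)
              (by simp only [List.length_reverse, length_pref]; omega)]
          rw [show n - (0 + 1) + 1 = n from by omega]
          rw [show s.drop n = [] from by rw [hn]; exact List.drop_length]
          rw [show R.drop n = [] from by rw [← hRlen]; exact List.drop_length]
          simp
        rw [hdrop]
        rw [show List.replicate (n - (0 + 1)) (1 : Int) ++ [(1 : Int)]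
              = List.replicate (n - (0 + 1) + 1) 1 from (List.replicate_succ').symm]
        congr 1
        omega
    · -- inductive step: 1 ≤ m, m < n; iteration i = m fires
      have hmn : m < n := by omega
      rw [List.range_succ, List.foldl_append, List.foldl_cons, List.foldl_nil,
          ih (by omega) (by omega)]
      have hm0 : (m : Int) ≠ 0 := by omega
      simp only [stepA, hm0, if_pos, ne_eq, not_false_eq_true]
      have hcast1 : (m : Int) - 1 = ((m - 1 : Nat) : Int) := by omega
      have hcast2 : (n : Int) - (m : Int) - 1 = ((n - m - 1 : Nat) : Int) := by omega
      have hcast3 : (n : Int) - (m : Int) = ((n - m : Nat) : Int) := by omega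
      rw [hcast1, hcast2, hcast3]
      simp only [PySem.List.pySetD_natCast, PySem.List.pyGetD_natCast]
      have hLtake : (L.take m).length = m := by simp [hLlen]; omega
      have hRdroplen : (R.drop (n - m)).length = m := by simp [hRlen]; omega
      simp only [Prod.mk.injEq]
      refine ⟨?_, ?_⟩
      · -- left component
        have hread : ((L.take m ++ List.replicate (n - m) 1).getD (m - 1) 0) = (s.take (m - 1)).prod := by
          rw [List.getD_eq_getElem _ _ (by simp [hLtake]; omega),
              List.getElem_append_left (by omega), List.getElem_take]
          exact getElem_pref_one s (m - 1) (by omega) (by rw [length_pref]; omega)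
        have hsrd : s.getD (m - 1) 0 = s[m - 1]'(by omega) :=
          List.getD_eq_getElem _ _ (by omega)
        rw [hread, hsrd]
        have hv : (s.take (m - 1)).prod * s[m - 1]'(by omega) = (s.take m).prod := by
          have h := List.prod_take_succ s (m - 1) (by omega)
          rw [show m - 1 + 1 = m from by omega] at h
          rw [← h]
        rw [hv]
        rw [List.set_append, if_neg (by omega), hLtake]
        have : m - m = 0 := by omega
        rw [this]
        have hrepl : List.replicate (n - m) (1 : Int) = 1 :: List.replicate (n - m - 1) 1 := by
          have h : n - m = (n - m - 1) + 1 := by omega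
          rw [h, List.replicate_succ]
          simp
        rw [hrepl, List.set_cons_zero]
        have htk : L.take (m + 1) = L.take m ++ [(s.take m).prod] := by
          rw [List.take_add_one, List.getElem?_eq_getElem (by rw [hLlen, hn]; omega)]
          rw [show L[m]'(by rw [hLlen, hn]; omega) = (s.take m).prod from
            getElem_pref_one s m (by omega) (by rw [length_pref]; omega)]
          rfl
        rw [htk]
        simp [Nat.sub_sub]
      · -- right component
        have hread : ((List.replicate (n - m) (1:Int) ++ R.drop (n - m)).getD (n - m) 0)
            = (s.drop (n - m + 1)).prod := by
          rw [List.getD_eq_getElem _ _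
                (by rw [List.length_append, List.length_replicate, hRdroplen]; omega),
              List.getElem_append_right (by simp)]
          simp only [List.length_replicate, Nat.sub_self, List.getElem_drop, Nat.add_zero]
          exact getElem_rev_pref s (n - m) (by omega)
            (by simp only [List.length_reverse, length_pref]; omega)
        have hsrd : s.getD (n - m) 0 = s[n - m]'(by omega) :=
          List.getD_eq_getElem _ _ (by omega)
        rw [hread, hsrd]
        have hv : (s.drop (n - m + 1)).prod * s[n - m]'(by omega) = (s.drop (n - m)).prod := by
          rw [List.drop_eq_getElem_cons (show n - m < s.length by omega), List.prod_cons]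
          ring
        rw [hv]
        rw [List.set_append, if_pos (by simp; omega)]
        have hrepl : List.replicate (n - m) (1 : Int)
            = List.replicate (n - m - 1) 1 ++ [(1:Int)] := by
          have h : n - m = (n - m - 1) + 1 := by omega
          rw [h, List.replicate_succ']
          simp
        rw [hrepl, List.set_append, if_neg (by simp)]
        simp only [List.length_replicate]
        have : n - m - 1 - (n - m - 1) = 0 := by omega
        rw [this, List.set_cons_zero]
        have hdrop : R.drop (n - m - 1) = (s.drop (n - m)).prod :: R.drop (n - m) := by
          rw [List.drop_eq_getElem_cons (show n - m - 1 < R.length by omega)]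
          rw [show R[n - m - 1]'(by omega) = (s.drop (n - m - 1 + 1)).prod from
            getElem_rev_pref s (n - m - 1) (by omega)
              (by simp only [List.length_reverse, length_pref]; omega)]
          rw [show n - m - 1 + 1 = n - m from by omega]
        have hsub : n - (m + 1) = n - m - 1 := by omega
        rw [hsub, hdrop]
        simp

-- ===== VERDICT (by name: the statement is the Claim_ definition above) =====
theorem gen_help_table_spec : Claim_equal_gen_help_table := by
  intro s _
  unfold Spec_gen_help_table
  rw [alt_eq, suf_eq_rev_pref]
  unfold gen_help_table
  rcases Nat.eq_zero_or_pos s.length with h0 | hpos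
  · have hnil : s = [] := List.eq_nil_of_length_eq_zero h0
    subst hnil
    simp [pref]
  · rw [PySem.List.pyRange_zero_natCast, List.foldl_map,
        invA s s.length hpos le_rfl]
    rw [List.take_of_length_le (le_of_eq (length_pref 1 s))]
    simp
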